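-- pv_equiv track=rewrite | github.com/SVCE-ACM/A-December-Of_Algorithms-2024 | December 08/python3_DigitManipulation.py | digit_square_sum
-- ===== SOURCE A (Python) =====
-- def return_digits(num):
--     digits = []
--
--     while (num > 0):
--         digit = num % 10
--         digits.append(digit)
--
--         num = int(num/10)
--
--     return digits
--
-- def digit_square_sum(N):
--     sum = 0
--
--     for i in range(1, N+1):
--         if (i<=9): sum += i**2
--         else:
--             for digit in return_digits(i):
--                 sum += digit**2
--     return sum
-- ===== SOURCE B (Python) =====
-- def digit_square_sum(N):
--     # O(log^2 N) positional recurrence instead of A's O(N log N) enumeration.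
--     def dsq(n):
--         s = 0
--         while n > 0:
--             s += (n % 10) ** 2
--             n //= 10
--         return s
--
--     def S(n):
--         # S(n) = sum of dsq(i) for i = 1..n
--         if n <= 0:
--             return 0
--         q, r = divmod(n, 10)
--         return q * 285 + r * (r + 1) * (2 * r + 1) // 6 + 10 * S(q - 1) + (r + 1) * dsq(q)
--
--     return S(N)
-- ===== Notes on version B (the rewrite author's own statement) =====
-- stated objective: faster
-- what changed: Replaces A's enumeration of every i from one up to N (digit-decomposing each) by a positional recurrence on the leading digits: S(n) = q*(sum of the nine digit squares) + T(r) + ten*S(q-1) + (r+1)*dsq(q), with q and r the quotient and remainder of n by ten, recursing on the number of digits.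
import Mathlib
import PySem

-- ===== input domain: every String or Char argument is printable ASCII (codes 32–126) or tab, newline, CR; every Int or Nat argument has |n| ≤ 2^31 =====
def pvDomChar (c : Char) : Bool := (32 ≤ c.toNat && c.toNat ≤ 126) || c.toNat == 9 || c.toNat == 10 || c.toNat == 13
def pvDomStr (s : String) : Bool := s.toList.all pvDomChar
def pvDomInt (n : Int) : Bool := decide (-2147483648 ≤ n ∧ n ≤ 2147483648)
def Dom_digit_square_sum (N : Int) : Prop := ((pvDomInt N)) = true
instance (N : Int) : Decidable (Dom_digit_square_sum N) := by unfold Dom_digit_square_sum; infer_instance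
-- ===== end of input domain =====

-- B replaces A's per-number enumeration of 1..N by a positional recurrence on N's digits (objective: faster).

-- ===== PORT A =====
-- A's `int(num/10)` is float division then truncation; for the 0 < num ≤ 2^31 values reached
-- inside Dom it is exactly floor division num // 10, and is ported as such.
def returnDigits (num : Int) : List Int :=
  if _h : num > 0 then
    PySem.Int.mod num 10 :: returnDigits (PySem.Int.floordiv num 10)
  else
    []
termination_by num.toNat
decreasing_by
  rw [PySem.Int.floordiv_eq_ediv_of_pos (by norm_num : (0:Int) < 10)]
  omega

def digit_square_sum (N : Int) : Int :=
  (PySem.List.pyRange 1 (N + 1) 1).foldl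
    (fun sum i =>
      if i ≤ 9 then sum + i ^ 2
      else (returnDigits i).foldl (fun sum digit => sum + digit ^ 2) sum)
    0

-- ===== PORT B =====
-- Source B's dsq: while-loop accumulating squares of the decimal digits of n.
def dsqLoop (n s : Int) : Int :=
  if _h : n > 0 then
    dsqLoop (PySem.Int.floordiv n 10) (s + (PySem.Int.mod n 10) ^ 2)
  else
    s
termination_by n.toNat
decreasing_by
  rw [PySem.Int.floordiv_eq_ediv_of_pos (by norm_num : (0:Int) < 10)]
  omega

-- Source B's S: positional recurrence over the decimal quotient q and remainder r of n.
def sqSumUpTo (n : Int) : Int :=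
  if _h : n ≤ 0 then 0
  else
    let q := PySem.Int.floordiv n 10
    let r := PySem.Int.mod n 10
    q * 285 + PySem.Int.floordiv (r * (r + 1) * (2 * r + 1)) 6 + 10 * sqSumUpTo (q - 1)
      + (r + 1) * dsqLoop q 0
termination_by n.toNat
decreasing_by
  rw [PySem.Int.floordiv_eq_ediv_of_pos (by norm_num : (0:Int) < 10)]
  omega

def digit_square_sum_alt (N : Int) : Int := sqSumUpTo N

-- ===== PRECONDITION & SPEC =====
def Spec_digit_square_sum (N : Int) (out : Int) : Prop := out = digit_square_sum_alt N
instance (N : Int) (out : Int) : Decidable (Spec_digit_square_sum N out) := by unfold Spec_digit_square_sum; infer_instance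

-- ===== CLAIM (what is proved, stated in full; the proofs are below) =====
def Claim_equal_digit_square_sum : Prop := ∀ (N : Int), Dom_digit_square_sum N → Spec_digit_square_sum N (digit_square_sum N)

-- ===== LEMMAS AND PROOFS =====

theorem dsqLoop_stop (n : Int) (h : ¬ n > 0) (s : Int) : dsqLoop n s = s := by
  rw [dsqLoop]
  simp [h]

theorem dsqLoop_acc_aux : ∀ (k : ℕ) (n s : Int), n.toNat ≤ k → dsqLoop n s = s + dsqLoop n 0 := by
  intro k
  induction k with
  | zero =>
    intro n s hn
    have h : ¬ n > 0 := by omega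
    rw [dsqLoop_stop n h, dsqLoop_stop n h]
    ring
  | succ k ih =>
    intro n s hn
    by_cases h : n > 0
    · have hlt : (PySem.Int.floordiv n 10).toNat ≤ k := by
        rw [PySem.Int.floordiv_eq_ediv_of_pos (by norm_num : (0:Int) < 10)]
        omega
      conv_lhs => rw [dsqLoop]
      conv_rhs => rw [dsqLoop]
      simp only [h, dite_true]
      rw [ih _ _ hlt, ih _ ((0:Int) + (PySem.Int.mod n 10) ^ 2) hlt]
      ring
    · rw [dsqLoop_stop n h, dsqLoop_stop n h]
      ring

theorem dsqLoop_acc (n s : Int) : dsqLoop n s = s + dsqLoop n 0 :=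
  dsqLoop_acc_aux n.toNat n s le_rfl

-- A's inner digit loop computes B's dsq.
theorem foldA_eq_dsqLoop : ∀ (k : ℕ) (n s : Int), n.toNat ≤ k →
    (returnDigits n).foldl (fun sum digit => sum + digit ^ 2) s = dsqLoop n s := by
  intro k
  induction k with
  | zero =>
    intro n s hn
    have h : ¬ n > 0 := by omega
    rw [returnDigits, dsqLoop_stop n h]
    simp [h]
  | succ k ih =>
    intro n s hn
    by_cases h : n > 0
    · have hlt : (PySem.Int.floordiv n 10).toNat ≤ k := by
        rw [PySem.Int.floordiv_eq_ediv_of_pos (by norm_num : (0:Int) < 10)]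
        omega
      rw [returnDigits]
      conv_rhs => rw [dsqLoop]
      simp only [h, dite_true, List.foldl_cons]
      exact ih _ _ hlt
    · rw [returnDigits, dsqLoop_stop n h]
      simp [h]

theorem dsqLoop_pos (n : Int) (h : n > 0) :
    dsqLoop n 0 = (n % 10) ^ 2 + dsqLoop (n / 10) 0 := by
  rw [dsqLoop, dif_pos h, dsqLoop_acc,
      PySem.Int.floordiv_eq_ediv_of_pos (by norm_num : (0:Int) < 10),
      PySem.Int.mod_eq_emod_of_pos (by norm_num : (0:Int) < 10)]
  ring

theorem sqSumUpTo_nonpos (n : Int) (h : n ≤ 0) : sqSumUpTo n = 0 := by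
  rw [sqSumUpTo, dif_pos h]

theorem sqSumUpTo_pos (n : Int) (h : 0 < n) :
    sqSumUpTo n = n / 10 * 285
      + PySem.Int.floordiv ((n % 10) * (n % 10 + 1) * (2 * (n % 10) + 1)) 6
      + 10 * sqSumUpTo (n / 10 - 1) + (n % 10 + 1) * dsqLoop (n / 10) 0 := by
  rw [sqSumUpTo, dif_neg (by omega : ¬ n ≤ 0)]
  rw [PySem.Int.floordiv_eq_ediv_of_pos (by norm_num : (0:Int) < 10),
      PySem.Int.mod_eq_emod_of_pos (by norm_num : (0:Int) < 10)]

theorem dsqLoop_small (r : Int) (h0 : 0 ≤ r) (h9 : r ≤ 9) : dsqLoop r 0 = r ^ 2 := by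
  by_cases h : r > 0
  · rw [dsqLoop_pos r h,
        show r % 10 = r by omega, show r / 10 = 0 by omega,
        dsqLoop_stop 0 (by omega)]
    ring
  · rw [dsqLoop_stop r h, show r = 0 by omega]
    ring

theorem Tdiff (r : Int) (h1 : 1 ≤ r) (h9 : r ≤ 9) :
    PySem.Int.floordiv (r * (r + 1) * (2 * r + 1)) 6
      = PySem.Int.floordiv ((r - 1) * (r - 1 + 1) * (2 * (r - 1) + 1)) 6 + r ^ 2 := by
  interval_cases r <;> decide

-- step of B
theorem sqSumUpTo_step : ∀ (k : ℕ) (n : Int), n.toNat ≤ k → 1 ≤ n →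
    sqSumUpTo n = sqSumUpTo (n - 1) + dsqLoop n 0 := by
  intro k
  induction k with
  | zero => intro n hn h1; omega
  | succ k ih =>
    intro n hn h1
    have hd := dsqLoop_pos n (by omega)
    by_cases hr : 1 ≤ n % 10
    · by_cases h2 : n = 1
      · subst h2
        rw [show (1:Int) - 1 = 0 by ring, sqSumUpTo_nonpos 0 le_rfl,
            sqSumUpTo_pos 1 (by norm_num),
            show (1:Int) / 10 = 0 by decide, show (1:Int) % 10 = 1 by decide,
            show (0:Int) - 1 = -1 by ring, sqSumUpTo_nonpos (-1) (by norm_num),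
            dsqLoop_stop 0 (by norm_num),
            show PySem.Int.floordiv ((1:Int) * (1 + 1) * (2 * 1 + 1)) 6 = 1 by decide,
            dsqLoop_small 1 (by norm_num) (by norm_num)]
        ring
      · rw [sqSumUpTo_pos n (by omega), sqSumUpTo_pos (n - 1) (by omega), hd,
            show (n - 1) / 10 = n / 10 by omega,
            show (n - 1) % 10 = n % 10 - 1 by omega,
            Tdiff (n % 10) hr (by omega)]
        ring
    · have hr0 : n % 10 = 0 := by omega
      have hn10 : 10 ≤ n := by omega
      rw [sqSumUpTo_pos n (by omega), sqSumUpTo_pos (n - 1) (by omega), hd,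
          show (n - 1) / 10 = n / 10 - 1 by omega,
          show (n - 1) % 10 = 9 by omega, hr0,
          show PySem.Int.floordiv ((0:Int) * (0 + 1) * (2 * 0 + 1)) 6 = 0 by decide,
          show PySem.Int.floordiv ((9:Int) * (9 + 1) * (2 * 9 + 1)) 6 = 285 by decide]
      by_cases hq : n / 10 = 1
      · rw [hq, show (1:Int) - 1 = 0 by ring, sqSumUpTo_nonpos 0 le_rfl,
            show (0:Int) - 1 = -1 by ring, sqSumUpTo_nonpos (-1) (by norm_num),
            dsqLoop_stop 0 (by norm_num)]
        ring
      · have hs := ih (n / 10 - 1) (by omega) (by omega)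
        rw [hs]
        ring

theorem main_eq : ∀ (k : ℕ) (n : Int), n.toNat ≤ k → digit_square_sum n = sqSumUpTo n := by
  intro k
  induction k with
  | zero =>
    intro n hn
    unfold digit_square_sum
    rw [PySem.List.pyRange_one_eq_nil (by omega : n + 1 ≤ 1), List.foldl_nil,
        sqSumUpTo_nonpos n (by omega)]
  | succ k ih =>
    intro n hn
    by_cases h : n ≤ 0
    · unfold digit_square_sum
      rw [PySem.List.pyRange_one_eq_nil (by omega : n + 1 ≤ 1), List.foldl_nil,
          sqSumUpTo_nonpos n h]
    · have h1 : 1 ≤ n := by omega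
      have hpre : (PySem.List.pyRange 1 n 1).foldl
          (fun sum i =>
            if i ≤ 9 then sum + i ^ 2
            else (returnDigits i).foldl (fun sum digit => sum + digit ^ 2) sum) 0
          = sqSumUpTo (n - 1) := by
        have := ih (n - 1) (by omega)
        unfold digit_square_sum at this
        rw [show n - 1 + 1 = n by ring] at this
        exact this
      unfold digit_square_sum
      rw [PySem.List.pyRange_one_succ_right (by omega : (1:Int) ≤ n), List.foldl_append,
          List.foldl_cons, List.foldl_nil, hpre,
          sqSumUpTo_step n.toNat n le_rfl h1]
      by_cases h9 : n ≤ 9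
      · rw [if_pos h9, dsqLoop_small n (by omega) h9]
      · rw [if_neg h9, foldA_eq_dsqLoop n.toNat n _ le_rfl, dsqLoop_acc]

-- ===== VERDICT (by name: the statement is the Claim_ definition above) =====
theorem digit_square_sum_spec : Claim_equal_digit_square_sum := by
  intro N _
  unfold Spec_digit_square_sum digit_square_sum_alt
  exact main_eq N.toNat N le_rfl
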